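-- pv_equiv track=rewrite | github.com/pisterlabs/promptset | data/scraping-2.0/repos/aemartinez~gpt-latex-translator/gptlatextranslator~GPTTranslator.py | _separate_commented_blocks
-- ===== SOURCE A (Python) =====
-- from typing import List
--
-- def _separate_commented_blocks(string: str) -> List[str]:
--     """Split a string into blocks. Each block is a sequence of lines where either
--     all of them are commented out or non of them are."""
--
--     blocks = []
--     block = ""
--     commented_block = False
--     for line in string.splitlines():
--         if line.startswith("%"):
--             if not commented_block:
--                 blocks.append(block)
--                 block = line
--                 commented_block = True
--             else:
--                 block += "\n" + line
--         else:
--             if commented_block: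
--                 blocks.append(block)
--                 block = line
--                 commented_block = False
--             else:
--                 block += "\n" + line
--     blocks.append(block)
--
--     return blocks
-- ===== SOURCE B (Python) =====
-- from typing import List
--
-- def _separate_commented_blocks(string: str) -> List[str]:
--     """Split a string into blocks of consecutive all-commented or all-uncommented
--     lines.  A sentinel empty (uncommented) line is prepended, modelling the empty
--     initial block; each maximal run of same-kind lines is then joined into one block."""
--     lines = [""] + string.splitlines()
--     n = len(lines)
--     blocks = []
--     i = 0
--     while i < n:
--         commented = lines[i].startswith("%")
--         j = i
--         while j < n and lines[j].startswith("%") == commented: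
--             j += 1
--         blocks.append("\n".join(lines[i:j]))
--         i = j
--     return blocks
-- ===== Notes on version B (the rewrite author's own statement) =====
-- stated objective: alternative
-- what changed: Replaces A's flag-plus-growing-string state machine with run splitting: prepend an empty sentinel line, cut the line list into maximal runs of equal commentedness with a two-pointer scan, and join each run with newlines.
import Mathlib
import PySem

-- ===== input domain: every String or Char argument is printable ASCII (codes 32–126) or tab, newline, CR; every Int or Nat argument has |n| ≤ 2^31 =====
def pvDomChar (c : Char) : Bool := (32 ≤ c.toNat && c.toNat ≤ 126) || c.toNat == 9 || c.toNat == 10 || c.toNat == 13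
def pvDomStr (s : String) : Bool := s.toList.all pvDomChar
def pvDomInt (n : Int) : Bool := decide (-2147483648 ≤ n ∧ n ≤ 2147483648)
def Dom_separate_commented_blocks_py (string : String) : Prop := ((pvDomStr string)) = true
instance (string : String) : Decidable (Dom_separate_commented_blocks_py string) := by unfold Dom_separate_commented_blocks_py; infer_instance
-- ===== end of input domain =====

-- B replaces A's commented-flag state machine with sentinel + run-splitting + per-run join (alternative decomposition, same cost).


-- ===== PORT A =====
-- literal transliteration of A: fold over splitlines with state (blocks, block, commented_block)
def pvStepA (st : List String × String × Bool) (line : String) : List String × String × Bool :=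
  let (blocks, block, commented_block) := st
  if PySem.Str.startswith line "%" then
    if !commented_block then (blocks ++ [block], line, true)
    else (blocks, block ++ "\n" ++ line, commented_block)
  else
    if commented_block then (blocks ++ [block], line, false)
    else (blocks, block ++ "\n" ++ line, commented_block)

def separate_commented_blocks_py (string : String) : List String :=
  let st := (PySem.Str.splitlines string).foldl pvStepA ([], "", false)
  st.1 ++ [st.2.1]

-- ===== PORT B =====
-- transliteration of B: cut the line list into maximal runs of equal `startswith "%"`
-- (the inner `while j < n and …` advance is the takeWhile/dropWhile pair)
def pvRuns : List String → List (List String)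
  | [] => []
  | x :: xs =>
      let commented := PySem.Str.startswith x "%"
      (x :: xs.takeWhile (fun y => PySem.Str.startswith y "%" == commented)) ::
        pvRuns (xs.dropWhile (fun y => PySem.Str.startswith y "%" == commented))
termination_by ls => ls.length
decreasing_by
  simp only [List.length_cons]
  exact Nat.lt_succ_of_le (List.length_dropWhile_le _ _)

def separate_commented_blocks_py_alt (string : String) : List String :=
  (pvRuns ("" :: PySem.Str.splitlines string)).map (PySem.Str.join "\n")

-- ===== PRECONDITION & SPEC =====
def Spec_separate_commented_blocks_py (string : String) (out : List String) : Prop := out = separate_commented_blocks_py_alt string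
instance (string : String) (out : List String) : Decidable (Spec_separate_commented_blocks_py string out) := by unfold Spec_separate_commented_blocks_py; infer_instance

-- ===== CLAIM (what is proved, stated in full; the proofs are below) =====
def Claim_equal_separate_commented_blocks_py : Prop := ∀ (string : String), Dom_separate_commented_blocks_py string → Spec_separate_commented_blocks_py string (separate_commented_blocks_py string)

-- ===== LEMMAS AND PROOFS =====

-- key of a line
def pvKey (l : String) : Bool := PySem.Str.startswith l "%"

-- A's loop, rephrased as structural recursion on the remaining lines (blocks prefix factored out)
def pvF : List String → String → Bool → List String
  | [], b, _ => [b]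
  | l :: ls, b, c =>
      if pvKey l == c then pvF ls (b ++ "\n" ++ l) c
      else b :: pvF ls l (pvKey l)

-- B's tail, as seen from A's running state (b = current block, c = its commentedness)
def pvPhi (b : String) (c : Bool) : List (List String) → List String
  | [] => [b]
  | [] :: _ => [b]          -- unreachable: pvRuns produces nonempty runs
  | (y :: g) :: gs =>
      if pvKey y == c then (b ++ "\n" ++ PySem.Str.join "\n" (y :: g)) :: gs.map (PySem.Str.join "\n")
      else b :: ((y :: g) :: gs).map (PySem.Str.join "\n")

lemma pvJoin_cons_cons (x y : String) (g : List String) :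
    PySem.Str.join "\n" (x :: y :: g) = x ++ "\n" ++ PySem.Str.join "\n" (y :: g) := by
  have h : (PySem.Str.join "\n" (x :: y :: g)).toList
      = (x ++ "\n" ++ PySem.Str.join "\n" (y :: g)).toList := by
    simp [PySem.Chars.join_cons_cons]
  rw [← @String.ofList_toList (PySem.Str.join "\n" (x :: y :: g)), h, String.ofList_toList]

lemma pvJoin_singleton (x : String) : PySem.Str.join "\n" [x] = x := by
  simp [PySem.Str.join]

lemma pvRuns_cons (x : String) (xs : List String) :
    pvRuns (x :: xs) =
      (x :: xs.takeWhile (fun y => pvKey y == pvKey x)) ::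
        pvRuns (xs.dropWhile (fun y => pvKey y == pvKey x)) := by
  rw [pvRuns]; simp only [pvKey]

lemma pvRuns_cons_same {x y : String} (ys : List String) (h : pvKey y = pvKey x) :
    pvRuns (x :: y :: ys) =
      (x :: y :: ys.takeWhile (fun z => pvKey z == pvKey y)) ::
        pvRuns (ys.dropWhile (fun z => pvKey z == pvKey y)) := by
  rw [pvRuns_cons]
  have hp : (fun z => pvKey z == pvKey x) = (fun z => pvKey z == pvKey y) := by
    funext z; rw [h]
  simp [hp, h]

lemma pvRuns_cons_diff {x y : String} (ys : List String) (h : pvKey y ≠ pvKey x) :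
    pvRuns (x :: y :: ys) = [x] :: pvRuns (y :: ys) := by
  rw [pvRuns_cons]
  simp [h]

-- A's loop computes blocks ++ pvF lines block commented
lemma pvFoldA (ls : List String) : ∀ (blocks : List String) (b : String) (c : Bool),
    (ls.foldl pvStepA (blocks, b, c)).1 ++ [(ls.foldl pvStepA (blocks, b, c)).2.1]
      = blocks ++ pvF ls b c := by
  induction ls with
  | nil => intro blocks b c; simp [pvF]
  | cons l ls ih =>
      intro blocks b c
      by_cases hk : pvKey l = c
      · have : pvStepA (blocks, b, c) l = (blocks, b ++ "\n" ++ l, c) := by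
          cases c <;> simp_all [pvStepA, pvKey]
        simp [List.foldl_cons, this, ih, pvF, hk]
      · have : pvStepA (blocks, b, c) l = (blocks ++ [b], l, pvKey l) := by
          cases c <;> cases hl : pvKey l <;> simp_all [pvStepA, pvKey]
        simp [List.foldl_cons, this, ih, pvF, hk]

-- the central bridge: A's recursion equals B's run view
lemma pvF_eq_phi (ls : List String) : ∀ (b : String) (c : Bool),
    pvF ls b c = pvPhi b c (pvRuns ls) := by
  induction ls with
  | nil => intro b c; simp [pvF, pvRuns, pvPhi]
  | cons x ls ih =>
      intro b c
      cases ls with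
      | nil =>
          by_cases hk : pvKey x = c <;>
            simp [pvF, pvRuns, pvPhi, hk, pvJoin_singleton]
      | cons y ys =>
          by_cases hxy : pvKey y = pvKey x
          · rw [pvRuns_cons_same ys hxy]
            have hruns : pvRuns (y :: ys) =
                (y :: ys.takeWhile (fun z => pvKey z == pvKey y)) ::
                  pvRuns (ys.dropWhile (fun z => pvKey z == pvKey y)) := pvRuns_cons y ys
            by_cases hk : pvKey x = c
            · have h1 : pvF (x :: y :: ys) b c = pvF (y :: ys) (b ++ "\n" ++ x) c := by
                simp [pvF, hk]
              rw [h1, ih, hruns]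
              simp [pvPhi, hxy, hk, pvJoin_cons_cons, String.append_assoc]
            · have h1 : pvF (x :: y :: ys) b c = b :: pvF (y :: ys) x (pvKey x) := by
                simp [pvF, hk]
              rw [h1, ih, hruns]
              simp [pvPhi, hxy, hk, pvJoin_cons_cons]
          · rw [pvRuns_cons_diff ys hxy]
            have hruns : pvRuns (y :: ys) =
                (y :: ys.takeWhile (fun z => pvKey z == pvKey y)) ::
                  pvRuns (ys.dropWhile (fun z => pvKey z == pvKey y)) := pvRuns_cons y ys
            by_cases hk : pvKey x = c
            · have h1 : pvF (x :: y :: ys) b c = pvF (y :: ys) (b ++ "\n" ++ x) c := by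
                simp [pvF, hk]
              rw [h1, ih, hruns]
              have hyc : pvKey y ≠ c := by rw [hk] at hxy; exact hxy
              simp [pvPhi, hyc, hk, pvJoin_singleton]
            · have h1 : pvF (x :: y :: ys) b c = b :: pvF (y :: ys) x (pvKey x) := by
                simp [pvF, hk]
              rw [h1, ih, hruns]
              simp [pvPhi, hxy, hk, pvJoin_singleton]

lemma pvKey_empty : pvKey "" = false := by decide

-- pvPhi with the initial state ("", false) is exactly B with its sentinel line
lemma pvPhi_sentinel (ls : List String) :
    pvPhi "" false (pvRuns ls) = (pvRuns ("" :: ls)).map (PySem.Str.join "\n") := by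
  cases ls with
  | nil => simp [pvRuns, pvPhi, pvJoin_singleton]
  | cons y ys =>
      have hruns : pvRuns (y :: ys) =
          (y :: ys.takeWhile (fun z => pvKey z == pvKey y)) ::
            pvRuns (ys.dropWhile (fun z => pvKey z == pvKey y)) := pvRuns_cons y ys
      by_cases hy : pvKey y = false
      · have hsame : pvKey y = pvKey "" := by rw [hy, pvKey_empty]
        rw [pvRuns_cons_same ys hsame, hruns]
        simp [pvPhi, hy, pvJoin_cons_cons]
      · have hdiff : pvKey y ≠ pvKey "" := by rw [pvKey_empty]; exact hy
        rw [pvRuns_cons_diff ys hdiff, hruns]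
        simp [pvPhi, hy, pvJoin_singleton]

-- ===== VERDICT (by name: the statement is the Claim_ definition above) =====
theorem separate_commented_blocks_py_spec : Claim_equal_separate_commented_blocks_py := by
  intro s _
  unfold Spec_separate_commented_blocks_py separate_commented_blocks_py separate_commented_blocks_py_alt
  rw [pvFoldA (PySem.Str.splitlines s) [] "" false]
  rw [pvF_eq_phi, pvPhi_sentinel]
  simp
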